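-- pv_equiv track=rewrite | github.com/ct2iry-dot/Bridge-to-Thetis | Bridge.py | _same_band
-- ===== SOURCE A (Python) =====
-- _BAND_EDGES = [
--     (1_800_000,   2_000_000),
--     (3_500_000,   4_000_000),
--     (5_330_500,   5_403_500),
--     (7_000_000,   7_300_000),
--     (10_100_000, 10_150_000),
--     (14_000_000, 14_350_000),
--     (18_068_000, 18_168_000),
--     (21_000_000, 21_450_000),
--     (24_890_000, 24_990_000),
--     (28_000_000, 29_700_000),
--     (50_000_000, 54_000_000),
--     (144_000_000,148_000_000),
-- ]
--
-- def _same_band(freq_a: int, freq_b: int) -> bool: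
--     """Return True if both frequencies fall within the same ham band."""
--     for lo, hi in _BAND_EDGES:
--         a_in = lo <= freq_a <= hi
--         b_in = lo <= freq_b <= hi
--         if a_in and b_in:
--             return True
--         if a_in or b_in:
--             return False  # one inside, one outside — different bands
--     return False
-- ===== SOURCE B (Python) =====
-- _BAND_EDGES = [
--     (1_800_000,   2_000_000),
--     (3_500_000,   4_000_000),
--     (5_330_500,   5_403_500),
--     (7_000_000,   7_300_000),
--     (10_100_000, 10_150_000),
--     (14_000_000, 14_350_000),
--     (18_068_000, 18_168_000),
--     (21_000_000, 21_450_000),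
--     (24_890_000, 24_990_000),
--     (28_000_000, 29_700_000),
--     (50_000_000, 54_000_000),
--     (144_000_000,148_000_000),
-- ]
--
-- def _band_of(freq):
--     """Index of the band containing freq, or None if no band contains it."""
--     for i, (lo, hi) in enumerate(_BAND_EDGES):
--         if lo <= freq <= hi:
--             return i
--     return None
--
-- def _same_band(freq_a: int, freq_b: int) -> bool:
--     """Return True if both frequencies fall within the same ham band."""
--     band_a = _band_of(freq_a)
--     return band_a is not None and band_a == _band_of(freq_b)
-- ===== Notes on version B (the rewrite author's own statement) =====
-- stated objective: simpler
-- what changed: Replaced A's single interleaved early-exit scan (tracking both memberships at once with two exit conditions) by a _band_of helper that resolves each frequency's band index independently, then a plain comparison of the two indices.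
import Mathlib
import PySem

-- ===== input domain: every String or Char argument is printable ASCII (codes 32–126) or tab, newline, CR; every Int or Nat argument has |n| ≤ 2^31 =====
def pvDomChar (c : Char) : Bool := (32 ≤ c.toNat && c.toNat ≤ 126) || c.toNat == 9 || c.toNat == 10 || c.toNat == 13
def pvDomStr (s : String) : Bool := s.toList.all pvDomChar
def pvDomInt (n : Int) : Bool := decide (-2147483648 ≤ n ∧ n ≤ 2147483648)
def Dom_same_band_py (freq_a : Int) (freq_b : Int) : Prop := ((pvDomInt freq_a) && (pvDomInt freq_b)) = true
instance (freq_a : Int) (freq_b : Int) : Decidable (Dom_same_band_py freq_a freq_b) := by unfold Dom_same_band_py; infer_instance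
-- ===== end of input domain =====

-- ===== PORT A =====
-- B uses a different decomposition than A (independent band lookups vs one interleaved scan): simpler.
def pvBandEdges : List (Int × Int) :=
  [(1800000, 2000000), (3500000, 4000000), (5330500, 5403500), (7000000, 7300000),
   (10100000, 10150000), (14000000, 14350000), (18068000, 18168000), (21000000, 21450000),
   (24890000, 24990000), (28000000, 29700000), (50000000, 54000000), (144000000, 148000000)]

-- the for-loop of A: first band where either frequency is in decides the result
def pvLoopA (bands : List (Int × Int)) (freq_a freq_b : Int) : Bool :=
  match bands with
  | [] => false
  | (lo, hi) :: rest =>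
    let a_in := decide (lo ≤ freq_a ∧ freq_a ≤ hi)
    let b_in := decide (lo ≤ freq_b ∧ freq_b ≤ hi)
    if a_in && b_in then true
    else if a_in || b_in then false
    else pvLoopA rest freq_a freq_b

def same_band_py (freq_a : Int) (freq_b : Int) : Bool :=
  pvLoopA pvBandEdges freq_a freq_b

-- ===== PORT B =====
-- _band_of: index of the first band containing freq, or none
def pvBandOf (bands : List (Int × Int)) (freq : Int) : Option Nat :=
  match bands with
  | [] => none
  | (lo, hi) :: rest =>
    if lo ≤ freq ∧ freq ≤ hi then some 0
    else (pvBandOf rest freq).map (· + 1)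

def same_band_py_alt (freq_a : Int) (freq_b : Int) : Bool :=
  match pvBandOf pvBandEdges freq_a with
  | none => false
  | some i => some i == pvBandOf pvBandEdges freq_b

-- ===== PRECONDITION & SPEC =====
def Spec_same_band_py (freq_a : Int) (freq_b : Int) (out : Bool) : Prop := out = same_band_py_alt freq_a freq_b
instance (freq_a : Int) (freq_b : Int) (out : Bool) : Decidable (Spec_same_band_py freq_a freq_b out) := by unfold Spec_same_band_py; infer_instance

-- ===== CLAIM (what is proved, stated in full; the proofs are below) =====
def Claim_equal_same_band_py : Prop := ∀ (freq_a : Int) (freq_b : Int), Dom_same_band_py freq_a freq_b → Spec_same_band_py freq_a freq_b (same_band_py freq_a freq_b)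

-- ===== LEMMAS AND PROOFS =====
-- A's interleaved scan agrees with B's two independent lookups on ANY band list
theorem pvLoopA_eq_bandOf (bands : List (Int × Int)) (freq_a freq_b : Int) :
    pvLoopA bands freq_a freq_b =
      (match pvBandOf bands freq_a with
       | none => false
       | some i => some i == pvBandOf bands freq_b) := by
  induction bands with
  | nil => simp [pvLoopA, pvBandOf]
  | cons hd rest ih =>
    obtain ⟨lo, hi⟩ := hd
    by_cases ha : lo ≤ freq_a ∧ freq_a ≤ hi <;> by_cases hb : lo ≤ freq_b ∧ freq_b ≤ hi <;>
      simp [pvLoopA, pvBandOf, ha, hb, ih] <;>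
      cases pvBandOf rest freq_a <;> cases pvBandOf rest freq_b <;> simp

-- ===== VERDICT (by name: the statement is the Claim_ definition above) =====
theorem same_band_py_spec : Claim_equal_same_band_py := by
  intro freq_a freq_b _
  unfold Spec_same_band_py same_band_py same_band_py_alt
  exact pvLoopA_eq_bandOf pvBandEdges freq_a freq_b
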